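-- pv_equiv track=rewrite | github.com/Gengo250/App-GradeTurmas-Python | GradeHorario.py | _gerar_codigos_turma
-- ===== SOURCE A (Python) =====
-- from typing import Dict, List, Tuple, Optional
-- import string
--
-- def _gerar_codigos_turma(ano: int, qtd: int) -> List[str]:
--     """Gera rótulos: 1A, 1B, ..., 1Z, 1AA, 1AB, ... conforme 'qtd'."""
--     if ano <= 0: ano = 1
--     if qtd <= 0: qtd = 1
--     letras = string.ascii_uppercase  # A..Z
--     codes = []
--     i = 0
--     while len(codes) < qtd:
--         if i < 26:
--             sufixo = letras[i]
--         else: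
--             first = (i // 26) - 1
--             second = i % 26
--             sufixo = letras[first] + letras[second]
--         codes.append(f"{ano}{sufixo}")
--         i += 1
--     return codes
-- ===== SOURCE B (Python) =====
-- import string
--
-- def _gerar_codigos_turma(ano: int, qtd: int):
--     """Gera rótulos: 1A, 1B, ..., 1Z, 1AA, 1AB, ... conforme 'qtd'."""
--     if ano <= 0:
--         ano = 1
--     if qtd <= 0:
--         qtd = 1
--     U = string.ascii_uppercase
--     table = list(U) + [a + b for a in U for b in U]  # 702 suffixes A..Z, AA..ZZ
--     return [f"{ano}{table[i]}" for i in range(qtd)]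
-- ===== Notes on version B (the rewrite author's own statement) =====
-- stated objective: alternative
-- what changed: B precomputes the whole 702-entry suffix table (26 single letters plus a nested product of letter pairs) once and emits labels by direct table indexing over range(qtd), replacing A's incremental while-loop that derives each suffix on the fly with div/mod branching.
import Mathlib
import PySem

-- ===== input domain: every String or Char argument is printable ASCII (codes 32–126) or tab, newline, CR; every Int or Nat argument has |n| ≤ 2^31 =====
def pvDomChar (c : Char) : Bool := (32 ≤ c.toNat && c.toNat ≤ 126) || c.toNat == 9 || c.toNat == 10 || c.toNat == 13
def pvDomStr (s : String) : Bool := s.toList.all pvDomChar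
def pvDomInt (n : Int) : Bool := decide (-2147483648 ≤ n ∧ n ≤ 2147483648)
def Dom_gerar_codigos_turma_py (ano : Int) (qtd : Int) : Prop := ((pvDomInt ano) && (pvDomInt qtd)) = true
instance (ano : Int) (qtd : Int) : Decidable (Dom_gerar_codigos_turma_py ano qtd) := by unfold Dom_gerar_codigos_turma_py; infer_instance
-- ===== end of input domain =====

-- B builds the 702-entry suffix table once (26 letters, then a nested product of pairs) and emits
-- labels by direct indexing over a range, instead of A's while-loop deriving each suffix with
-- div/mod branching (objective: alternative).

-- ===== PORT A =====
-- string.ascii_uppercase as a list of chars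
def pvLetras : List Char := ['A','B','C','D','E','F','G','H','I','J','K','L','M',
                             'N','O','P','Q','R','S','T','U','V','W','X','Y','Z']

-- the while loop of A; letter indexing uses getD — in range whenever i < 702
-- (Pre_ guarantees the loop never reaches the indices where Python raises IndexError)
def pvLoopA (ano : Int) (n : Nat) (i : Nat) (codes : List String) : List String :=
  if codes.length < n then
    let sufixo : List Char :=
      if i < 26 then [pvLetras.getD i 'A']
      else [pvLetras.getD (i / 26 - 1) 'A', pvLetras.getD (i % 26) 'A']
    pvLoopA ano n (i + 1) (codes ++ [String.mk ((PySem.Int.toStr ano).toList ++ sufixo)])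
  else codes
termination_by n - codes.length
decreasing_by simp_all; omega

def gerar_codigos_turma_py (ano : Int) (qtd : Int) : List String :=
  let ano' := if ano ≤ 0 then 1 else ano
  let qtd' := if qtd ≤ 0 then 1 else qtd
  pvLoopA ano' qtd'.toNat 0 []

-- ===== PORT B =====
-- the precomputed 702-entry suffix table: A..Z then AA..ZZ (nested comprehension)
def pvTable : List (List Char) :=
  pvLetras.map (fun a => [a]) ++ pvLetras.flatMap (fun a => pvLetras.map (fun b => [a, b]))

-- table[i] uses getD — in range whenever i < 702 (Pre_), where Python raises IndexError otherwise
def gerar_codigos_turma_py_alt (ano : Int) (qtd : Int) : List String :=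
  let ano' := if ano ≤ 0 then 1 else ano
  let qtd' := if qtd ≤ 0 then 1 else qtd
  (List.range qtd'.toNat).map
    (fun i => String.mk ((PySem.Int.toStr ano').toList ++ pvTable.getD i []))

-- ===== PRECONDITION & SPEC =====
-- Pre_ excludes exactly qtd > 702, where both Pythons raise IndexError (letras[26] / table[702]).
def Pre_gerar_codigos_turma_py (ano : Int) (qtd : Int) : Prop := qtd ≤ 702
instance (ano : Int) (qtd : Int) : Decidable (Pre_gerar_codigos_turma_py ano qtd) := by
  unfold Pre_gerar_codigos_turma_py; infer_instance

def pvWitness_gerar_codigos_turma_py : Int × Int := (3, 30)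

def Spec_gerar_codigos_turma_py (ano : Int) (qtd : Int) (out : List String) : Prop := out = gerar_codigos_turma_py_alt ano qtd
instance (ano : Int) (qtd : Int) (out : List String) : Decidable (Spec_gerar_codigos_turma_py ano qtd out) := by unfold Spec_gerar_codigos_turma_py; infer_instance

-- ===== CLAIM (what is proved, stated in full; the proofs are below) =====
def Claim_equal_gerar_codigos_turma_py : Prop := ∀ (ano : Int) (qtd : Int), Dom_gerar_codigos_turma_py ano qtd → Pre_gerar_codigos_turma_py ano qtd → Spec_gerar_codigos_turma_py ano qtd (gerar_codigos_turma_py ano qtd)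

-- ===== LEMMAS AND PROOFS =====

-- A's suffix computation for index i
def pvSufA (i : Nat) : List Char :=
  if i < 26 then [pvLetras.getD i 'A']
  else [pvLetras.getD (i / 26 - 1) 'A', pvLetras.getD (i % 26) 'A']

lemma pvLen_letras : pvLetras.length = 26 := rfl
lemma pvLen_single : (pvLetras.map (fun a => [a])).length = 26 := rfl
lemma pvLen_pair (a : Char) : (pvLetras.map (fun b => [a, b])).length = 26 := rfl

lemma getD_map_single (xs : List Char) (k : Nat) (hk : k < xs.length) :
    (xs.map (fun a => [a])).getD k [] = [xs.getD k 'A'] := by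
  rw [List.getD_eq_getElem _ _ (by simpa using hk), List.getElem_map,
      List.getD_eq_getElem _ _ hk]

-- indexing into the nested-product part of the table
lemma getD_pairs (xs : List Char) (k : Nat) (hk : k < xs.length * 26) :
    (xs.flatMap (fun a => pvLetras.map (fun b => [a, b]))).getD k [] =
      [xs.getD (k / 26) 'A', pvLetras.getD (k % 26) 'A'] := by
  induction xs generalizing k with
  | nil => simp at hk
  | cons a xs ih =>
      simp only [List.flatMap_cons]
      by_cases h : k < 26
      · rw [List.getD_append _ _ _ _ (by rw [pvLen_pair]; omega)]
        rw [List.getD_eq_getElem _ _ (by rw [pvLen_pair]; omega), List.getElem_map]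
        have h0 : k / 26 = 0 := by omega
        have h1 : k % 26 = k := by omega
        rw [h0, h1]
        rw [List.getD_eq_getElem _ _ (show k < pvLetras.length by rw [pvLen_letras]; omega),
            List.getD_cons_zero]
      · rw [List.getD_append_right _ _ _ _ (by rw [pvLen_pair]; omega)]
        rw [pvLen_pair]
        rw [ih (k - 26) (by simp only [List.length_cons] at hk; omega)]
        have h2 : (k - 26) / 26 + 1 = k / 26 := by omega
        have h3 : (k - 26) % 26 = k % 26 := by omega
        rw [← h2, h3, List.getD_cons_succ]

-- A's suffix agrees with B's table for every index below 702
lemma sufA_eq_table (i : Nat) (h : i < 702) : pvSufA i = pvTable.getD i [] := by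
  unfold pvTable pvSufA
  by_cases hi : i < 26
  · rw [List.getD_append _ _ _ _ (by rw [pvLen_single]; omega)]
    rw [getD_map_single _ _ (by rw [pvLen_letras]; omega)]
    simp [hi]
  · rw [List.getD_append_right _ _ _ _ (by rw [pvLen_single]; omega)]
    rw [pvLen_single, getD_pairs _ _ (by rw [pvLen_letras]; omega)]
    have h2 : (i - 26) / 26 = i / 26 - 1 := by omega
    have h3 : (i - 26) % 26 = i % 26 := by omega
    rw [h2, h3]
    simp [hi]

-- the loop unrolls to a map over range' (invariant: i = codes.length)
lemma loopA_eq (ano : Int) (n : Nat) :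
    ∀ (m i : Nat) (codes : List String), codes.length = i → n - i = m →
      pvLoopA ano n i codes =
        codes ++ (List.range' i m).map
          (fun j => String.mk ((PySem.Int.toStr ano).toList ++ pvSufA j)) := by
  intro m
  induction m with
  | zero =>
      intro i codes hlen hm
      rw [pvLoopA]
      simp [hlen]
      omega
  | succ k ih =>
      intro i codes hlen hm
      rw [pvLoopA]
      have hi : i < n := by omega
      simp only [hlen, hi, if_pos]
      rw [ih (i + 1) _ (by simp [hlen]) (by omega)]
      simp [List.range'_succ, pvSufA]

-- ===== VERDICT (by name: the statement is the Claim_ definition above) =====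
theorem gerar_codigos_turma_py_spec : Claim_equal_gerar_codigos_turma_py := by
  intro ano qtd _ hpre
  unfold Spec_gerar_codigos_turma_py gerar_codigos_turma_py gerar_codigos_turma_py_alt
  dsimp only
  have h702 : (if qtd ≤ 0 then (1 : Int) else qtd).toNat ≤ 702 := by
    unfold Pre_gerar_codigos_turma_py at hpre
    split <;> omega
  rw [loopA_eq _ _ _ 0 [] rfl rfl]
  rw [List.range_eq_range']
  simp only [List.nil_append, Nat.sub_zero]
  apply List.map_congr_left
  intro j hj
  rw [List.mem_range'_1] at hj
  have hj702 : j < 702 := by omega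
  rw [sufA_eq_table j hj702]
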